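-- pv_equiv track=rewrite | github.com/Pragmatismo/power-visualizer | powervis.py | days_from_day_sets
-- ===== SOURCE A (Python) =====
-- from typing import List, Optional, Tuple, Dict, Iterable, Union
--
-- DAY_NAME_TO_INDEX = {
--     "mon": 0,
--     "tue": 1,
--     "wed": 2,
--     "thu": 3,
--     "fri": 4,
--     "sat": 5,
--     "sun": 6,
-- }
--
-- def days_from_day_sets(day_sets: List[dict]) -> Optional[Iterable[int]]:
--     if not day_sets:
--         return None
--     day_indices: List[int] = []
--     for day_set in day_sets:
--         for day in day_set.get("days", []):
--             index = DAY_NAME_TO_INDEX.get(str(day).lower())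
--             if index is not None and index not in day_indices:
--                 day_indices.append(index)
--     return day_indices
-- ===== SOURCE B (Python) =====
-- DAY_NAME_TO_INDEX = {
--     "mon": 0,
--     "tue": 1,
--     "wed": 2,
--     "thu": 3,
--     "fri": 4,
--     "sat": 5,
--     "sun": 6,
-- }
--
-- def days_from_day_sets(day_sets):
--     if not day_sets:
--         return None
--     # pass 1: flatten every recognised day name into one stream of indices
--     stream = [
--         DAY_NAME_TO_INDEX[str(day).lower()]
--         for day_set in day_sets
--         for day in day_set.get("days", [])
--         if str(day).lower() in DAY_NAME_TO_INDEX
--     ]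
--     # pass 2: for each of the 7 possible weekday indices, locate its first
--     # occurrence in the stream; emit the present ones ordered by that position.
--     pairs = [(stream.index(i), i) for i in range(7) if i in stream]
--     pairs.sort(key=lambda p: p[0])
--     return [i for _, i in pairs]
-- ===== Notes on version B (the rewrite author's own statement) =====
-- stated objective: alternative
-- what changed: A deduplicates on the fly with a membership test against the growing result list; B instead flattens all recognised indices into one stream, then for each of the 7 candidate weekday indices looks up its first position in the stream and sorts the present candidates by that position.
import Mathlib
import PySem

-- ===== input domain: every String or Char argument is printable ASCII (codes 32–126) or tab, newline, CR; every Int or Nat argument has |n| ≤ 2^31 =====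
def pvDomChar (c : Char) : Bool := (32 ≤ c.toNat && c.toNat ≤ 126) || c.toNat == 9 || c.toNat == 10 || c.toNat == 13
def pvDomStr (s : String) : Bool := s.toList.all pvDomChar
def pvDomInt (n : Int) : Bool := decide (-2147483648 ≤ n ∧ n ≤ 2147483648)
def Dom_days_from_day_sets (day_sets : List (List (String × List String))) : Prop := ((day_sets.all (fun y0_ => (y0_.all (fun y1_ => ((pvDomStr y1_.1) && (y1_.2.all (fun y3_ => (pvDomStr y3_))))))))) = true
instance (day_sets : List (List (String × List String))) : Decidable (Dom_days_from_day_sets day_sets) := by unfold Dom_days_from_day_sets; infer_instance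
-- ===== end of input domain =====

-- B replaces A's interleaved order-preserving dedup loop by a different algorithm: flatten the recognised
-- indices into one stream, then for each of the 7 candidate weekday indices take its first position in the
-- stream and sort the present candidates by that position (objective: alternative, same cost).


-- ===== PORT A =====
def DAY_NAME_TO_INDEX : PySem.Dict String Int :=
  ⟨[("mon", 0), ("tue", 1), ("wed", 2), ("thu", 3), ("fri", 4), ("sat", 5), ("sun", 6)]⟩

def days_from_day_sets (day_sets : List (List (String × List String))) : Option (List Int) :=
  if day_sets = [] then none
  else
    some (day_sets.foldl (fun day_indices day_set =>
      (PySem.Dict.getD ⟨day_set⟩ "days" []).foldl (fun day_indices day =>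
        match PySem.Dict.get? DAY_NAME_TO_INDEX (PySem.Str.lower day) with
        | some index => if day_indices.contains index then day_indices else day_indices ++ [index]
        | none => day_indices) day_indices) [])

-- ===== PORT B =====
def days_from_day_sets_alt (day_sets : List (List (String × List String))) : Option (List Int) :=
  if day_sets = [] then none
  else
    -- pass 1: one flat stream of every recognised index, duplicates and all
    let stream := day_sets.flatMap (fun day_set =>
      (PySem.Dict.getD ⟨day_set⟩ "days" []).filterMap (fun day =>
        PySem.Dict.get? DAY_NAME_TO_INDEX (PySem.Str.lower day)))
    -- pass 2: first position of each of the 7 candidate indices, sorted by position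
    let pairs := (PySem.List.pyRange 0 7).filterMap (fun i =>
      if stream.contains i then
        (PySem.List.index? stream i).map (fun (p : Nat) => ((p : Int), i))
      else none)
    some ((PySem.List.sorted pairs (fun p => p.1)).map (fun p => p.2))

-- ===== PRECONDITION & SPEC =====
def Spec_days_from_day_sets (day_sets : List (List (String × List String))) (out : Option (List Int)) : Prop := out = days_from_day_sets_alt day_sets
instance (day_sets : List (List (String × List String))) (out : Option (List Int)) : Decidable (Spec_days_from_day_sets day_sets out) := by unfold Spec_days_from_day_sets; infer_instance

-- ===== CLAIM (what is proved, stated in full; the proofs are below) =====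
def Claim_equal_days_from_day_sets : Prop := ∀ (day_sets : List (List (String × List String))), Dom_days_from_day_sets day_sets → Spec_days_from_day_sets day_sets (days_from_day_sets day_sets)

-- ===== LEMMAS AND PROOFS =====

-- first position of v in xs (Python's xs.index(v), defaulted; only used at members of xs)
def fpos (xs : List Int) (v : Int) : Nat := (PySem.List.index? xs v).getD 0

-- A's inner loop over one day list is the Set.add fold of the filterMap'd index list.
theorem inner_fold_eq (days : List String) (acc : List Int) :
    days.foldl (fun day_indices day =>
      match PySem.Dict.get? DAY_NAME_TO_INDEX (PySem.Str.lower day) with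
      | some index => if day_indices.contains index then day_indices else day_indices ++ [index]
      | none => day_indices) acc
    = (days.filterMap (fun day => PySem.Dict.get? DAY_NAME_TO_INDEX (PySem.Str.lower day))).foldl
        PySem.Set.add acc := by
  induction days generalizing acc with
  | nil => rfl
  | cons d ds ih =>
      cases h : PySem.Dict.get? DAY_NAME_TO_INDEX (PySem.Str.lower d) with
      | none =>
          simp only [List.foldl_cons, List.filterMap_cons, h]
          exact ih acc
      | some i =>
          simp only [List.foldl_cons, List.filterMap_cons, h]
          exact ih (PySem.Set.add acc i)

-- A's outer loop is the Set.add fold of B's flattened stream.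
theorem outer_fold_eq (sets : List (List (String × List String))) (acc : List Int) :
    sets.foldl (fun day_indices day_set =>
      (PySem.Dict.getD ⟨day_set⟩ "days" []).foldl (fun day_indices day =>
        match PySem.Dict.get? DAY_NAME_TO_INDEX (PySem.Str.lower day) with
        | some index => if day_indices.contains index then day_indices else day_indices ++ [index]
        | none => day_indices) day_indices) acc
    = (sets.flatMap (fun day_set =>
        (PySem.Dict.getD ⟨day_set⟩ "days" []).filterMap (fun day =>
          PySem.Dict.get? DAY_NAME_TO_INDEX (PySem.Str.lower day)))).foldl PySem.Set.add acc := by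
  induction sets generalizing acc with
  | nil => rfl
  | cons s ss ih =>
      simp only [List.foldl, List.flatMap_cons, List.foldl_append]
      rw [inner_fold_eq, ih]

-- every value the day table can produce lies in [0, 7)
theorem dict_val_range (k : String) (v : Int)
    (h : PySem.Dict.get? DAY_NAME_TO_INDEX k = some v) : 0 ≤ v ∧ v < 7 := by
  simp only [DAY_NAME_TO_INDEX, PySem.Dict.get?_mk_cons] at h
  split_ifs at h <;> simp [PySem.Dict.get?] at h <;> omega

-- every element of B's stream lies in [0, 7)
theorem stream_range (sets : List (List (String × List String))) (x : Int)
    (hx : x ∈ sets.flatMap (fun day_set =>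
        (PySem.Dict.getD ⟨day_set⟩ "days" []).filterMap (fun day =>
          PySem.Dict.get? DAY_NAME_TO_INDEX (PySem.Str.lower day)))) : 0 ≤ x ∧ x < 7 := by
  rw [List.mem_flatMap] at hx
  obtain ⟨ds, _, hx⟩ := hx
  rw [List.mem_filterMap] at hx
  obtain ⟨d, _, hd⟩ := hx
  exact dict_val_range _ _ hd

-- shifting the stream by one head element shifts first positions of old members ≠ head
theorem fpos_cons_of_ne_of_mem (x y : Int) (xs : List Int) (hne : y ≠ x) (hm : y ∈ xs) :
    fpos (x :: xs) y = fpos xs y + 1 := by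
  obtain ⟨k, hk⟩ := Option.isSome_iff_exists.mp ((PySem.List.index?_isSome_iff xs y).mpr hm)
  unfold fpos
  rw [PySem.List.index?_cons_of_ne xs (Ne.symm hne), hk]
  rfl

-- along set(xs) (first occurrences in order), first positions strictly increase
theorem fpos_pairwise (xs : List Int) :
    (PySem.Set.ofList xs).Pairwise (fun a b => fpos xs a < fpos xs b) := by
  induction xs with
  | nil => exact List.Pairwise.nil
  | cons x xs ih =>
      rw [PySem.Set.ofList_cons]
      constructor
      · intro b hb
        obtain ⟨hbs, hbne⟩ := (PySem.Set.mem_discard _ _ _).mp hb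
        rw [fpos_cons_of_ne_of_mem x b xs hbne ((PySem.Set.mem_ofList _ _).mp hbs)]
        have h0 : fpos (x :: xs) x = 0 := by
          unfold fpos; rw [PySem.List.index?_cons_self]; rfl
        omega
      · have h1 : ((PySem.Set.ofList xs).discard x).Pairwise
            (fun a b => fpos xs a < fpos xs b) := by
          unfold PySem.Set.discard
          exact List.Pairwise.filter _ ih
        refine h1.imp_of_mem (fun {a b} ha hb hab => ?_)
        obtain ⟨has, hane⟩ := (PySem.Set.mem_discard _ _ _).mp ha
        obtain ⟨hbs, hbne⟩ := (PySem.Set.mem_discard _ _ _).mp hb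
        rw [fpos_cons_of_ne_of_mem x a xs hane ((PySem.Set.mem_ofList _ _).mp has),
            fpos_cons_of_ne_of_mem x b xs hbne ((PySem.Set.mem_ofList _ _).mp hbs)]
        omega

-- B's pair comprehension, explicitly: present candidates mapped to (first position, value)
theorem pairs_eq (cands stream : List Int) :
    cands.filterMap (fun i =>
      if stream.contains i then
        (PySem.List.index? stream i).map (fun (p : Nat) => ((p : Int), i))
      else none)
    = (cands.filter (fun i => stream.contains i)).map (fun i => ((fpos stream i : Int), i)) := by
  induction cands with
  | nil => rfl
  | cons c cs ih =>
      by_cases hc : stream.contains c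
      · obtain ⟨k, hk⟩ := Option.isSome_iff_exists.mp
          ((PySem.List.index?_isSome_iff stream c).mpr (List.contains_iff_mem.mp hc))
        have hf : fpos stream c = k := by unfold fpos; rw [hk]; rfl
        simp only [List.filterMap_cons, List.filter_cons, hc, if_pos, hk, Option.map_some,
          List.map_cons, hf]
        rw [ih]
      · simp only [List.filterMap_cons, List.filter_cons, hc, if_neg, Bool.false_eq_true,
          not_false_iff]
        exact ih

-- core fact: sorting the 7 present candidates by first position recovers set(stream)'s order
theorem sorted_pairs_eq (stream : List Int) (hr : ∀ x ∈ stream, 0 ≤ x ∧ x < 7) :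
    (PySem.List.sorted
      ((PySem.List.pyRange 0 7).filterMap (fun i =>
        if stream.contains i then
          (PySem.List.index? stream i).map (fun (p : Nat) => ((p : Int), i))
        else none)) (fun p => p.1)).map (fun p => p.2)
    = PySem.Set.ofList stream := by
  rw [pairs_eq]
  have hperm : (((PySem.Set.ofList stream).map (fun i => ((fpos stream i : Int), i))).Perm
      (((PySem.List.pyRange 0 7).filter (fun i => stream.contains i)).map
        (fun i => ((fpos stream i : Int), i)))) := by
    refine List.Perm.map _ ?_
    rw [List.perm_ext_iff_of_nodup (PySem.Set.nodup_ofList _)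
      ((PySem.List.nodup_pyRange_one 0 7).filter _)]
    intro a
    rw [PySem.Set.mem_ofList, List.mem_filter, PySem.List.mem_pyRange_one, List.contains_iff_mem]
    exact ⟨fun h => ⟨hr a h, h⟩, fun h => h.2⟩
  have hpw : ((PySem.Set.ofList stream).map (fun i => ((fpos stream i : Int), i))).Pairwise
      (fun a b => a.1 < b.1) := by
    rw [List.pairwise_map]
    exact (fpos_pairwise stream).imp (fun h => Nat.cast_lt.mpr h)
  rw [PySem.List.sorted_eq_of_perm_of_pairwise_lt _ _ _ hperm hpw]
  rw [List.map_map]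
  simp [Function.comp_def]

-- ===== VERDICT (by name: the statement is the Claim_ definition above) =====
theorem days_from_day_sets_spec : Claim_equal_days_from_day_sets := by
  intro day_sets _
  unfold Spec_days_from_day_sets days_from_day_sets days_from_day_sets_alt
  by_cases h : day_sets = []
  · simp [h]
  · simp only [h, ite_false]
    rw [outer_fold_eq, ← PySem.Set.ofList_eq_foldl,
      sorted_pairs_eq _ (stream_range day_sets)]
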